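-- pv_equiv track=rewrite | github.com/cliffthelin/pdf-consensus-becr | restore_comprehensive_tests.py | group_functions_by_test_file
-- ===== SOURCE A (Python) =====
-- from typing import Dict, List, Set
--
-- def group_functions_by_test_file(functions: List[Dict]) -> Dict[str, List[Dict]]:
--     """Group functions by their test file."""
--     grouped = {}
--     for func in functions:
--         test_file = func.get('test_file', '')
--         if test_file:
--             if test_file not in grouped:
--                 grouped[test_file] = []
--             grouped[test_file].append(func)
--
--     return grouped
-- ===== SOURCE B (Python) =====
-- def group_functions_by_test_file(functions):
--     """Group functions by their test file."""
--     keys = dict.fromkeys(tf for f in functions if (tf := f.get('test_file', '')))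
--     return {k: [f for f in functions if f.get('test_file', '') == k] for k in keys}
-- ===== Notes on version B (the rewrite author's own statement) =====
-- stated objective: alternative
-- what changed: Replaces the incremental dict-building loop with a two-phase pass: collect the distinct non-empty test_file keys in first-occurrence order via dict.fromkeys, then build each group with one filter comprehension per key.
import Mathlib
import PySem

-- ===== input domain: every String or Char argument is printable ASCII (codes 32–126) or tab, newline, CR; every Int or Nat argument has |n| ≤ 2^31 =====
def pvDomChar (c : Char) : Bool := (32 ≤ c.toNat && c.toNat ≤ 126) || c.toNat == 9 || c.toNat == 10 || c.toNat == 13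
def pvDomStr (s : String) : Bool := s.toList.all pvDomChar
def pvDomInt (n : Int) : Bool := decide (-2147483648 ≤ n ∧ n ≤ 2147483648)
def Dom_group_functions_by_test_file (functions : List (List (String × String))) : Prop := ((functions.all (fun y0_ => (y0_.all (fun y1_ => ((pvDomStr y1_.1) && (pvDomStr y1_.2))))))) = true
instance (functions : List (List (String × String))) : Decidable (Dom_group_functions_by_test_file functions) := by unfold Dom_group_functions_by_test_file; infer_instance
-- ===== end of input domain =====

-- B replaces A's incremental dict-building loop with a two-phase pass (distinct non-empty keys in first-occurrence order, then one filter per key); alternative decomposition, not faster.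


-- ===== PORT A =====
def pvKeyOf (func : List (String × String)) : String :=
  PySem.Dict.getD (PySem.Dict.mk func) "test_file" ""

def pvStepA (grouped : PySem.Dict String (List (List (String × String))))
    (func : List (String × String)) : PySem.Dict String (List (List (String × String))) :=
  let test_file := pvKeyOf func
  if test_file ≠ "" then
    let grouped := if grouped.contains test_file then grouped
                   else grouped.insert test_file []
    grouped.modify test_file [] (fun l => l ++ [func])
  else grouped


def group_functions_by_test_file (functions : List (List (String × String))) : List (String × List (List (String × String))) :=
  (functions.foldl pvStepA PySem.Dict.empty).items

-- ===== PORT B =====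
def group_functions_by_test_file_alt (functions : List (List (String × String))) : List (String × List (List (String × String))) :=
  let keys := PySem.List.dedup (functions.filterMap (fun f =>
    let tf := pvKeyOf f
    if tf = "" then none else some tf))
  keys.map (fun k => (k, functions.filter (fun f => pvKeyOf f == k)))


-- ===== PRECONDITION & SPEC =====
def Spec_group_functions_by_test_file (functions : List (List (String × String))) (out : List (String × List (List (String × String)))) : Prop := out = group_functions_by_test_file_alt functions
instance (functions : List (List (String × String))) (out : List (String × List (List (String × String)))) : Decidable (Spec_group_functions_by_test_file functions out) := by unfold Spec_group_functions_by_test_file; infer_instance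

-- ===== CLAIM (what is proved, stated in full; the proofs are below) =====
def Claim_equal_group_functions_by_test_file : Prop := ∀ (functions : List (List (String × String))), Dom_group_functions_by_test_file functions → Spec_group_functions_by_test_file functions (group_functions_by_test_file functions)

-- ===== LEMMAS AND PROOFS =====
def pvKeys (xs : List (List (String × String))) : List String :=
  xs.filterMap (fun f => let tf := pvKeyOf f; if tf = "" then none else some tf)

lemma pv_alt_eq (xs : List (List (String × String))) :
    group_functions_by_test_file_alt xs
      = (PySem.Set.ofList (pvKeys xs)).map (fun k => (k, xs.filter (fun f => pvKeyOf f == k))) := by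
  simp only [group_functions_by_test_file_alt, PySem.List.dedup_eq_ofList, pvKeys]

lemma pvKeys_append_singleton (xs : List (List (String × String))) (x : List (String × String)) :
    pvKeys (xs ++ [x]) = pvKeys xs ++ (if pvKeyOf x = "" then [] else [pvKeyOf x]) := by
  simp only [pvKeys, List.filterMap_append]
  split <;> simp_all [List.filterMap]

lemma pv_mem_keys (xs : List (List (String × String))) (k : String) :
    k ∈ PySem.Set.ofList (pvKeys xs) ↔ (k ≠ "" ∧ ∃ f ∈ xs, pvKeyOf f = k) := by
  rw [PySem.Set.mem_ofList]
  simp only [pvKeys, List.mem_filterMap]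
  constructor
  · rintro ⟨f, hf, h⟩
    by_cases h0 : pvKeyOf f = "" <;> simp [h0] at h
    exact ⟨h ▸ h0, f, hf, h⟩
  · rintro ⟨hk, f, hf, rfl⟩
    exact ⟨f, hf, by simp [hk]⟩

lemma pv_find_map {β : Type} (h : String → β) (ks : List String) (k0 : String) :
    (ks.map (fun k => (k, h k))).find? (fun p => p.1 == k0)
      = if k0 ∈ ks then some (k0, h k0) else none := by
  induction ks with
  | nil => simp
  | cons a t ih =>
    by_cases ha : a = k0
    · subst ha; simp [List.find?]
    · simp only [List.map_cons, List.find?]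
      have hb : (a == k0) = false := by simp [ha]
      simp [hb, ih, Ne.symm ha]

lemma pv_any_map {β : Type} (h : String → β) (ks : List String) (k0 : String) :
    (ks.map (fun k => (k, h k))).any (fun p => p.1 == k0) = decide (k0 ∈ ks) := by
  by_cases hmem : k0 ∈ ks
  · simp only [List.any_eq_true, hmem, decide_true]
    exact ⟨(k0, h k0), List.mem_map_of_mem hmem, by simp⟩
  · simp only [hmem, decide_false, List.any_eq_false]
    intro p hp
    rcases List.mem_map.1 hp with ⟨k, hkS, rfl⟩
    simp only [beq_iff_eq]
    rintro rfl
    exact hmem hkS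

lemma pv_main (xs : List (List (String × String))) :
    xs.foldl pvStepA PySem.Dict.empty
      = PySem.Dict.mk (group_functions_by_test_file_alt xs) := by
  induction xs using List.reverseRecOn with
  | nil => rfl
  | append_singleton xs x ih =>
    rw [List.foldl_append, List.foldl_cons, List.foldl_nil, ih]
    apply PySem.Dict.ext
    rw [pv_alt_eq, pv_alt_eq, pvKeys_append_singleton]
    set k0 := pvKeyOf x with hk0
    set S := PySem.Set.ofList (pvKeys xs) with hS
    by_cases hx : k0 = ""
    · rw [if_pos hx, List.append_nil, ← hS]
      have hstep : pvStepA (PySem.Dict.mk (S.map (fun k => (k, xs.filter (fun f => pvKeyOf f == k))))) x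
          = PySem.Dict.mk (S.map (fun k => (k, xs.filter (fun f => pvKeyOf f == k)))) := by
        simp [pvStepA, ← hk0, hx]
      rw [hstep]
      show S.map _ = S.map _
      apply List.map_congr_left
      intro k hkS
      have hk := ((pv_mem_keys xs k).1 (hS ▸ hkS)).1
      have hne : (k0 == k) = false := by
        simp only [beq_eq_false_iff_ne]; intro h; exact hk (hx ▸ h.symm)
      simp [List.filter_append, List.filter, ← hk0, hne]
    · rw [if_neg hx]
      rw [PySem.Set.ofList_eq_foldl, List.foldl_append, ← PySem.Set.ofList_eq_foldl, ← hS]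
      show (pvStepA (PySem.Dict.mk (S.map (fun k => (k, xs.filter (fun f => pvKeyOf f == k))))) x).items
          = (List.foldl PySem.Set.add S [k0]).map _
      rw [List.foldl_cons, List.foldl_nil]
      by_cases hmem : k0 ∈ S
      · have hadd : PySem.Set.add S k0 = S := by
          simp [PySem.Set.add, PySem.Set.contains, hmem]
        rw [hadd]
        have hcon : (PySem.Dict.mk (S.map (fun k => (k, xs.filter (fun f => pvKeyOf f == k))))).contains k0 = true := by
          rw [PySem.Dict.contains_mk, pv_any_map]; simp [hmem]
        have hget : (PySem.Dict.mk (S.map (fun k => (k, xs.filter (fun f => pvKeyOf f == k))))).getD k0 []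
            = xs.filter (fun f => pvKeyOf f == k0) := by
          simp only [PySem.Dict.getD, PySem.Dict.get?, PySem.Dict.items]
          rw [pv_find_map]
          simp [hmem]
        simp only [pvStepA, ← hk0, hx, ne_eq, not_false_iff, if_true, hcon, if_pos,
          PySem.Dict.modify, hget, PySem.Dict.insert, hcon, PySem.Dict.items]
        rw [List.map_map]
        apply List.map_congr_left
        intro k hkS
        by_cases hk : k = k0
        · subst hk
          simp [List.filter_append, List.filter, ← hk0]
        · have hb : (k == k0) = false := by simp [hk]
          have hb' : (k0 == k) = false := by simp [beq_eq_false_iff_ne]; exact fun h => hk h.symm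
          simp [Function.comp, hb, List.filter_append, List.filter, ← hk0, hb']
      · have hadd : PySem.Set.add S k0 = S ++ [k0] := by
          simp [PySem.Set.add, PySem.Set.contains, hmem]
        rw [hadd]
        have hcon : (PySem.Dict.mk (S.map (fun k => (k, xs.filter (fun f => pvKeyOf f == k))))).contains k0 = false := by
          rw [PySem.Dict.contains_mk, pv_any_map]; simp [hmem]
        have hfilt : xs.filter (fun f => pvKeyOf f == k0) = [] := by
          rw [List.filter_eq_nil_iff]
          intro f hf
          simp only [beq_iff_eq]
          intro hkey
          exact hmem (hS ▸ (pv_mem_keys xs k0).2 ⟨hx, f, hf, hkey⟩)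
        have hcon2 : (PySem.Dict.mk (S.map (fun k => (k, xs.filter (fun f => pvKeyOf f == k))) ++ [(k0, ([] : List (List (String × String))))])).contains k0 = true := by
          rw [PySem.Dict.contains_mk]
          simp
        have hget2 : (PySem.Dict.mk (S.map (fun k => (k, xs.filter (fun f => pvKeyOf f == k))) ++ [(k0, ([] : List (List (String × String))))])).getD k0 []
            = [] := by
          simp only [PySem.Dict.getD, PySem.Dict.get?, PySem.Dict.items]
          rw [List.find?_append, pv_find_map]
          simp [hmem]
        have hins : (PySem.Dict.mk (S.map (fun k => (k, xs.filter (fun f => pvKeyOf f == k))))).insert k0 []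
            = PySem.Dict.mk (S.map (fun k => (k, xs.filter (fun f => pvKeyOf f == k))) ++ [(k0, [])]) := by
          simp [PySem.Dict.insert, hcon]
        simp only [pvStepA, ← hk0, hx, ne_eq, not_false_iff, if_true, hcon, Bool.false_eq_true,
          if_false, hins, PySem.Dict.modify, hget2, PySem.Dict.insert, hcon2, PySem.Dict.items]
        rw [List.map_append, List.map_map, List.map_append]
        congr 1
        · apply List.map_congr_left
          intro k hkS
          have hk : k ≠ k0 := fun h => hmem (h ▸ hkS)
          have hb : (k == k0) = false := by simp [hk]
          have hb' : (k0 == k) = false := by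
            simp only [beq_eq_false_iff_ne]; exact fun h => hk h.symm
          simp [Function.comp, hb, List.filter_append, List.filter, ← hk0, hb']
        · simp [List.filter_append, List.filter, ← hk0, hfilt]

-- ===== VERDICT (by name: the statement is the Claim_ definition above) =====
theorem group_functions_by_test_file_spec : Claim_equal_group_functions_by_test_file := by
  intro functions _
  show group_functions_by_test_file functions = group_functions_by_test_file_alt functions
  unfold group_functions_by_test_file
  rw [pv_main]
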